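-- pv_equiv track=rewrite | github.com/MustafaAl-Kayyali/Hakathon-AI25 | Back/floorplan_final.py | _group_rooms
-- ===== SOURCE A (Python) =====
-- def _group_rooms(base_name, per_room_type, total_count, per_group):
--     groups = []
--     n = max(1, per_group)
--     idx, remaining = 1, total_count
--     while remaining > 0:
--         k = min(n, remaining)
--         groups.append((f"{base_name} {idx}", per_room_type, k))
--         remaining -= k
--         idx += 1
--     return groups
-- ===== SOURCE B (Python) =====
-- def _group_rooms(base_name, per_room_type, total_count, per_group):
--     if total_count <= 0:
--         return []
--     n = max(1, per_group)
--     q, r = divmod(total_count, n)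
--     groups = [(f"{base_name} {i + 1}", per_room_type, n) for i in range(q)]
--     if r > 0:
--         groups.append((f"{base_name} {q + 1}", per_room_type, r))
--     return groups
-- ===== Notes on version B (the rewrite author's own statement) =====
-- stated objective: alternative
-- what changed: Replaces the subtract-until-empty while loop carrying a running 'remaining' counter with a closed-form divmod layout: q uniform groups built in one pass over range(q) plus one special-cased remainder group.
import Mathlib
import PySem

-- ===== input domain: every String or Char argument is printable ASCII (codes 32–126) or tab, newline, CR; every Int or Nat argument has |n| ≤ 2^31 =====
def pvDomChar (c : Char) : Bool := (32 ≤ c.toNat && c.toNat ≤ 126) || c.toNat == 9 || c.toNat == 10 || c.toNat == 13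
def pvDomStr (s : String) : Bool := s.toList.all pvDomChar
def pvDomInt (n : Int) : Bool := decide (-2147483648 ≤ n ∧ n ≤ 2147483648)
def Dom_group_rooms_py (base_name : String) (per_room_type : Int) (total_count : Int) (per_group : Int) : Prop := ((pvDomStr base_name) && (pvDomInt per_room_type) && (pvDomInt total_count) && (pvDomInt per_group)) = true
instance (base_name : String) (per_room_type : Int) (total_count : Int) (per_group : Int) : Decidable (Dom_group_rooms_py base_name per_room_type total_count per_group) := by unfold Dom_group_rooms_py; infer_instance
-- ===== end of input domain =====

-- ===== PORT A =====
-- B replaces A's subtract-until-empty while loop with a closed-form divmod layout (alternative decomposition, same cost).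
-- helper: A's `while remaining > 0` loop (recursion on remaining.toNat; 1 ≤ n is needed for
-- termination and is guaranteed by A's n = max(1, per_group)); k = min(n, remaining) inlined
def pvGroupsLoop (base_name : String) (per_room_type : Int) (n : Int) (hn : 1 ≤ n) (idx remaining : Int) : List (String × Int × Int) :=
  if _h : remaining > 0 then
    (base_name ++ " " ++ PySem.Int.toStr idx, per_room_type, min n remaining) ::
      pvGroupsLoop base_name per_room_type n hn (idx + 1) (remaining - min n remaining)
  else []
termination_by remaining.toNat
decreasing_by
  omega

def group_rooms_py (base_name : String) (per_room_type : Int) (total_count : Int) (per_group : Int) : List (String × Int × Int) :=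
  pvGroupsLoop base_name per_room_type (max 1 per_group) (le_max_left 1 per_group) 1 total_count

-- ===== PORT B =====
def group_rooms_py_alt (base_name : String) (per_room_type : Int) (total_count : Int) (per_group : Int) : List (String × Int × Int) :=
  if total_count ≤ 0 then []
  else
    let n := max 1 per_group
    let q := PySem.Int.floordiv total_count n
    let r := PySem.Int.mod total_count n
    -- range(q) ported as List.range q.toNat (exact: q ≥ 0 here since total_count > 0 and n ≥ 1)
    let groups := (List.range q.toNat).map
      (fun (i : Nat) => (base_name ++ " " ++ PySem.Int.toStr ((i : Int) + 1), per_room_type, n))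
    if r > 0 then groups ++ [(base_name ++ " " ++ PySem.Int.toStr (q + 1), per_room_type, r)]
    else groups

-- ===== PRECONDITION & SPEC =====
def Spec_group_rooms_py (base_name : String) (per_room_type : Int) (total_count : Int) (per_group : Int) (out : List (String × Int × Int)) : Prop := out = group_rooms_py_alt base_name per_room_type total_count per_group
instance (base_name : String) (per_room_type : Int) (total_count : Int) (per_group : Int) (out : List (String × Int × Int)) : Decidable (Spec_group_rooms_py base_name per_room_type total_count per_group out) := by unfold Spec_group_rooms_py; infer_instance

-- ===== CLAIM (what is proved, stated in full; the proofs are below) =====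
def Claim_equal_group_rooms_py : Prop := ∀ (base_name : String) (per_room_type : Int) (total_count : Int) (per_group : Int), Dom_group_rooms_py base_name per_room_type total_count per_group → Spec_group_rooms_py base_name per_room_type total_count per_group (group_rooms_py base_name per_room_type total_count per_group)

-- ===== LEMMAS AND PROOFS =====

-- closed form of A's loop, for any starting index
lemma pvGroupsLoop_closed (base_name : String) (per_room_type n : Int) (hn : 1 ≤ n)
    (idx remaining : Int) :
    pvGroupsLoop base_name per_room_type n hn idx remaining =
      if remaining ≤ 0 then [] else
        (List.range (PySem.Int.floordiv remaining n).toNat).map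
          (fun (i : Nat) => (base_name ++ " " ++ PySem.Int.toStr (idx + (i : Int)), per_room_type, n)) ++
        (if PySem.Int.mod remaining n > 0 then
          [(base_name ++ " " ++ PySem.Int.toStr (idx + PySem.Int.floordiv remaining n),
            per_room_type, PySem.Int.mod remaining n)]
        else []) := by
  have hn0 : (0:Int) < n := by omega
  fun_induction pvGroupsLoop with
  | case1 idx remaining h ih =>
    rw [ih, if_neg (show ¬ remaining ≤ 0 by omega)]
    by_cases hbig : n ≤ remaining
    · rw [min_eq_left hbig]
      by_cases hz : remaining - n ≤ 0
      · have hrn : remaining = n := le_antisymm (by omega) hbig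
        subst hrn
        rw [if_pos (by omega : remaining - remaining ≤ 0)]
        have h1 : PySem.Int.floordiv remaining remaining = 1 := by
          rw [PySem.Int.floordiv_eq_ediv_of_pos hn0]
          exact Int.ediv_self (by omega)
        have h2 : PySem.Int.mod remaining remaining = 0 := by
          rw [PySem.Int.mod_eq_emod_of_pos hn0]
          simp
        rw [h1, h2]
        norm_num
      · rw [if_neg hz]
        have hq : PySem.Int.floordiv remaining n = PySem.Int.floordiv (remaining - n) n + 1 := by
          rw [PySem.Int.floordiv_eq_ediv_of_pos hn0, PySem.Int.floordiv_eq_ediv_of_pos hn0]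
          conv_lhs => rw [show remaining = (remaining - n) + 1 * n by ring]
          rw [Int.add_mul_ediv_right _ _ (show n ≠ 0 by omega)]
        have hm : PySem.Int.mod remaining n = PySem.Int.mod (remaining - n) n := by
          rw [PySem.Int.mod_eq_emod_of_pos hn0, PySem.Int.mod_eq_emod_of_pos hn0]
          rw [Int.sub_emod_right]
        have hq0 : 0 ≤ PySem.Int.floordiv (remaining - n) n := by
          rw [PySem.Int.floordiv_eq_ediv_of_pos hn0]
          exact Int.ediv_nonneg (by omega) (by omega)
        rw [hq, hm, show (PySem.Int.floordiv (remaining - n) n + 1).toNat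
              = (PySem.Int.floordiv (remaining - n) n).toNat + 1 by omega,
            List.range_succ_eq_map]
        simp only [List.map_cons, List.map_map, List.cons_append]
        congr 1
        · norm_num
        · congr 1
          · apply List.map_congr_left
            intro i _
            have e' : idx + ((i : Int) + 1) = idx + 1 + (i : Int) := by ring
            simp [Function.comp, e']
          · have : idx + (PySem.Int.floordiv (remaining - n) n + 1)
                = idx + 1 + PySem.Int.floordiv (remaining - n) n := by ring
            rw [this]
    · have hlt : remaining < n := lt_of_not_ge hbig
      rw [min_eq_right (le_of_lt hlt), if_pos (show remaining - remaining ≤ 0 by omega)]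
      have hq : PySem.Int.floordiv remaining n = 0 := by
        rw [PySem.Int.floordiv_eq_ediv_of_pos hn0]
        exact Int.ediv_eq_zero_of_lt (by omega) hlt
      have hm : PySem.Int.mod remaining n = remaining := by
        rw [PySem.Int.mod_eq_emod_of_pos hn0]
        exact Int.emod_eq_of_lt (by omega) hlt
      rw [hq, hm, if_pos h]
      norm_num
  | case2 idx remaining h =>
    rw [if_pos (by omega)]

-- ===== VERDICT (by name: the statement is the Claim_ definition above) =====
theorem group_rooms_py_spec : Claim_equal_group_rooms_py := by
  intro base_name per_room_type total_count per_group _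
  show group_rooms_py base_name per_room_type total_count per_group
      = group_rooms_py_alt base_name per_room_type total_count per_group
  unfold group_rooms_py group_rooms_py_alt
  rw [pvGroupsLoop_closed]
  by_cases h : total_count ≤ 0
  · rw [if_pos h, if_pos h]
  · rw [if_neg h, if_neg h]
    simp only []
    by_cases hr : PySem.Int.mod total_count (max 1 per_group) > 0
    · rw [if_pos hr, if_pos hr]
      congr 1
      · apply List.map_congr_left
        intro i _
        rw [Int.add_comm 1 (i : Int)]
      · rw [Int.add_comm 1 (PySem.Int.floordiv total_count (max 1 per_group))]
    · rw [if_neg hr, if_neg hr, List.append_nil]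
      apply List.map_congr_left
      intro i _
      rw [Int.add_comm 1 (i : Int)]
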